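-- pv_equiv track=rewrite | github.com/kevingrip/figus | Funciones.py | usuario_ml
-- ===== SOURCE A (Python) =====
-- def usuario_ml (usuario_mercadolibre):
--     validacion=True
--     validacionNombre = True
--     nombre=''
--     usuario=''
--     lista_usuario=[]
--
--
--     for letra in usuario_mercadolibre:
--         usuario_mercadolibre=usuario_mercadolibre+')'
--         if letra=="(":
--             validacion=False
--         if validacion is True:
--             if validacionNombre is True:
--                 if letra!=' ':
--                     nombre += letra
--                 else:
--                     validacionNombre = False
--         if validacion is False:
--             if letra!="(" and letra!=")":
--                 usuario=usuario+letra
--     lista_usuario.append(nombre)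
--     lista_usuario.append(usuario)
--     return lista_usuario
-- ===== SOURCE B (Python) =====
-- def usuario_ml(usuario_mercadolibre):
--     head, _, tail = usuario_mercadolibre.partition('(')
--     nombre = head.split(' ')[0]
--     usuario = tail.replace('(', '').replace(')', '')
--     return [nombre, usuario]
-- ===== Notes on version B (the rewrite author's own statement) =====
-- stated objective: faster
-- what changed: Replaced the two-flag character-by-character state machine (which also rebuilds the rebound parameter string with +')' every iteration, making A quadratic) with three string-method calls: partition on the first '(', take the head up to the first space for the name, and strip parens from the tail for the username.
import Mathlib
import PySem

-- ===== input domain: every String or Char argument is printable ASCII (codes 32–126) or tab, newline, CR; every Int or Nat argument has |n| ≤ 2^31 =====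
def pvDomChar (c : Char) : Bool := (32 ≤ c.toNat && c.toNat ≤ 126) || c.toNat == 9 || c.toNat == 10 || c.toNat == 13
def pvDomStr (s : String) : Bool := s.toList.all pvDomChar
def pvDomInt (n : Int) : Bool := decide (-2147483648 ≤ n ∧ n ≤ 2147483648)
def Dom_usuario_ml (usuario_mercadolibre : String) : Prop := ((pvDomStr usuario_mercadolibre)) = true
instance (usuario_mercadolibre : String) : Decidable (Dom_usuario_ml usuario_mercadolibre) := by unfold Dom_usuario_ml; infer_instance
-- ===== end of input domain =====

-- B replaces A's two-flag state machine by partition/split/replace string methods (objective: simpler).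
-- Note: A rebinds the parameter (s = s + ')') inside the loop; Python iterates over the original
-- string object, so this rebinding never affects the result — the port carries it as dead state.

-- ===== PORT A =====
-- state: the (dead) rebound parameter string, validacion, validacionNombre, nombre, usuario
def usuario_ml_loop : List Char → List Char → Bool → Bool → List Char → List Char → List Char × List Char
  | [], _, _, _, n, u => (n, u)
  | c :: rest, s, v, vn, n, u =>
    let s' := s ++ [')']                          -- usuario_mercadolibre = usuario_mercadolibre + ')'
    let v' := if c = '(' then false else v
    let (vn', n') :=
      if v' = true then
        (if vn = true then (if c ≠ ' ' then (vn, n ++ [c]) else (false, n)) else (vn, n))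
      else (vn, n)
    let u' :=
      if v' = false then (if c ≠ '(' ∧ c ≠ ')' then u ++ [c] else u) else u
    usuario_ml_loop rest s' v' vn' n' u'

def usuario_ml (usuario_mercadolibre : String) : List String :=
  let (n, u) := usuario_ml_loop usuario_mercadolibre.toList usuario_mercadolibre.toList true true [] []
  [String.ofList n, String.ofList u]

-- ===== PORT B =====
-- head, _, tail = s.partition('(') ; nombre = head.split(' ')[0] ; usuario = tail stripped of parens
def usuario_ml_alt (usuario_mercadolibre : String) : List String :=
  let l := usuario_mercadolibre.toList
  let head := l.takeWhile (fun c => c ≠ '(')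
  let tail := l.dropWhile (fun c => c ≠ '(')     -- still carries the '(' separator, removed by replace
  let nombre := head.takeWhile (fun c => c ≠ ' ')
  let usuario := tail.filter (fun c => c ≠ '(' ∧ c ≠ ')')
  [String.ofList nombre, String.ofList usuario]

-- ===== PRECONDITION & SPEC =====
def Spec_usuario_ml (usuario_mercadolibre : String) (out : List String) : Prop := out = usuario_ml_alt usuario_mercadolibre
instance (usuario_mercadolibre : String) (out : List String) : Decidable (Spec_usuario_ml usuario_mercadolibre out) := by unfold Spec_usuario_ml; infer_instance

-- ===== CLAIM (what is proved, stated in full; the proofs are below) =====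
def Claim_equal_usuario_ml : Prop := ∀ (usuario_mercadolibre : String), Dom_usuario_ml usuario_mercadolibre → Spec_usuario_ml usuario_mercadolibre (usuario_ml usuario_mercadolibre)

-- ===== LEMMAS AND PROOFS =====

-- Once validacion is False it stays False: usuario collects every non-paren char.
theorem loop_false (cs : List Char) : ∀ (s : List Char) (vn : Bool) (n u : List Char),
    usuario_ml_loop cs s false vn n u = (n, u ++ cs.filter (fun c => c ≠ '(' ∧ c ≠ ')')) := by
  induction cs with
  | nil => intro s vn n u; simp [usuario_ml_loop]
  | cons c rest ih =>
    intro s vn n u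
    simp only [usuario_ml_loop, List.filter_cons]
    by_cases h : c = '(' <;> by_cases h2 : c = ')' <;>
      simp [h, h2, ih] <;> simp_all

-- After the name phase ended (vn = false) but before '(': nothing changes until '(' is met.
theorem loop_nospace (cs : List Char) : ∀ (s : List Char) (n u : List Char),
    usuario_ml_loop cs s true false n u =
      (n, u ++ (cs.dropWhile (fun c => c ≠ '(')).filter (fun c => c ≠ '(' ∧ c ≠ ')')) := by
  induction cs with
  | nil => intro s n u; simp [usuario_ml_loop]
  | cons c rest ih =>
    intro s n u
    by_cases h : c = '('
    · simp [usuario_ml_loop, h, loop_false, List.dropWhile_cons, List.filter_cons]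
    · simp [usuario_ml_loop, h, ih, List.dropWhile_cons]

-- Main invariant for the initial phase (both flags True).
theorem loop_main (cs : List Char) : ∀ (s : List Char) (n u : List Char),
    usuario_ml_loop cs s true true n u =
      (n ++ cs.takeWhile (fun c => c ≠ ' ' ∧ c ≠ '('),
       u ++ (cs.dropWhile (fun c => c ≠ '(')).filter (fun c => c ≠ '(' ∧ c ≠ ')')) := by
  induction cs with
  | nil => intro s n u; simp [usuario_ml_loop]
  | cons c rest ih =>
    intro s n u
    by_cases h : c = '('
    · simp [usuario_ml_loop, h, loop_false, List.takeWhile_cons, List.dropWhile_cons,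
        List.filter_cons]
    · by_cases h2 : c = ' '
      · simp [usuario_ml_loop, h, h2, loop_nospace, List.takeWhile_cons, List.dropWhile_cons]
      · simp [usuario_ml_loop, h, h2, ih, List.takeWhile_cons, List.dropWhile_cons]

theorem takeWhile_takeWhile' (cs : List Char) :
    cs.takeWhile (fun c => !decide (c = ' ') && !decide (c = '('))
      = (cs.takeWhile (fun c => !decide (c = '('))).takeWhile (fun c => !decide (c = ' ')) := by
  induction cs with
  | nil => rfl
  | cons c rest ih =>
    by_cases h : c = '(' <;> by_cases h2 : c = ' ' <;>
      simp [List.takeWhile_cons, h, h2, ih] <;> simp_all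

-- ===== VERDICT (by name: the statement is the Claim_ definition above) =====
theorem usuario_ml_spec : Claim_equal_usuario_ml := by
  intro s _
  unfold Spec_usuario_ml usuario_ml usuario_ml_alt
  simp [loop_main, takeWhile_takeWhile']
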